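-- pv_equiv track=rewrite | github.com/TaimoorDevOfficial/Protrades | backend/routes/probot.py | _intent_hint
-- ===== SOURCE A (Python) =====
-- def _intent_hint(user_text_lower: str) -> str | None:
--     """Short extra line when the question goes beyond what offline data includes."""
--     t = user_text_lower
--     if any(k in t for k in ("nifty", "sensex", "bank nifty", "banknifty")):
--         return (
--             "Note: Nifty/Sensex/Bank Nifty index levels are not in your broker snapshot above — add an Anthropic API key for web-backed index and news."
--         )
--     if any(k in t for k in ("fii", "dii", "foreign institutional")):
--         return "Note: FII/DII flows are not in the Rupeezy snapshot; use Intel or enable AI + web search for flow headlines."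
--     if any(k in t for k in ("corporate action", "dividend", "split", "bonus", "rights", "buyback")) and "verify" not in t:
--         return "Always verify ex-date and record date on the exchange circular before acting on corporate events."
--     if any(k in t for k in ("risk", "stop loss", "position size")):
--         return "Risk reminder: size trades to max loss per idea; avoid single-name concentration."
--     return None
-- ===== SOURCE B (Python) =====
-- # Match-all-then-select: invert rules into a keyword->priority map, gather every
-- # matching priority in one pass, answer = message of the minimum priority.
-- _RULE_KEYWORDS = [
--     ["nifty", "sensex", "bank nifty", "banknifty"],
--     ["fii", "dii", "foreign institutional"],
--     ["corporate action", "dividend", "split", "bonus", "rights", "buyback"],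
--     ["risk", "stop loss", "position size"],
-- ]
--
-- _MESSAGES = [
--     "Note: Nifty/Sensex/Bank Nifty index levels are not in your broker snapshot above — add an Anthropic API key for web-backed index and news.",
--     "Note: FII/DII flows are not in the Rupeezy snapshot; use Intel or enable AI + web search for flow headlines.",
--     "Always verify ex-date and record date on the exchange circular before acting on corporate events.",
--     "Risk reminder: size trades to max loss per idea; avoid single-name concentration.",
-- ]
--
-- _KEYWORD_RULE = {kw: i for i, kws in enumerate(_RULE_KEYWORDS) for kw in kws}
--
--
-- def _intent_hint(user_text_lower: str) -> str | None:
--     skip_corporate = "verify" in user_text_lower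
--     hits = [i for kw, i in _KEYWORD_RULE.items()
--             if kw in user_text_lower and not (i == 2 and skip_corporate)]
--     best = min(hits, default=None)
--     return None if best is None else _MESSAGES[best]
-- ===== Notes on version B (the rewrite author's own statement) =====
-- stated objective: alternative
-- what changed: A's ordered early-return if-chain is replaced by a match-all-then-select algorithm: a keyword-to-priority map built once, one comprehension collecting every matching priority (the corporate rule suppressed when 'verify' occurs), and min() picking the winning priority into a message table.
import Mathlib
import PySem

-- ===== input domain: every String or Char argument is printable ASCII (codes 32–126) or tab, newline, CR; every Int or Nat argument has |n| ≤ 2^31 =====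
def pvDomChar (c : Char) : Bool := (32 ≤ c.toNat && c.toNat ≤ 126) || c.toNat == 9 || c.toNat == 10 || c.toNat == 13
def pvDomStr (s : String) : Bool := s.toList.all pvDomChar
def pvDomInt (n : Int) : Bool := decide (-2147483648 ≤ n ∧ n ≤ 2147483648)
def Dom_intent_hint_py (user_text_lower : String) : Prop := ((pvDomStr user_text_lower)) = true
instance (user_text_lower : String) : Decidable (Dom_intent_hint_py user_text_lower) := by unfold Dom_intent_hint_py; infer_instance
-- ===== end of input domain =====

-- B replaces A's ordered early-return if-chain by a match-all-then-select pass: a keyword→priority map, one comprehension of all matching priorities, min() into a message table; objective: alternative.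


-- ===== PORT A =====
def intent_hint_py (user_text_lower : String) : Option String :=
  let t := user_text_lower
  if (["nifty", "sensex", "bank nifty", "banknifty"].any (fun k => PySem.Str.isIn k t)) then
    some "Note: Nifty/Sensex/Bank Nifty index levels are not in your broker snapshot above — add an Anthropic API key for web-backed index and news."
  else if (["fii", "dii", "foreign institutional"].any (fun k => PySem.Str.isIn k t)) then
    some "Note: FII/DII flows are not in the Rupeezy snapshot; use Intel or enable AI + web search for flow headlines."
  else if (["corporate action", "dividend", "split", "bonus", "rights", "buyback"].any (fun k => PySem.Str.isIn k t))
        && !(PySem.Str.isIn "verify" t) then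
    some "Always verify ex-date and record date on the exchange circular before acting on corporate events."
  else if (["risk", "stop loss", "position size"].any (fun k => PySem.Str.isIn k t)) then
    some "Risk reminder: size trades to max loss per idea; avoid single-name concentration."
  else
    none

-- ===== PORT B =====
def pvRuleKeywords : List (List String) :=
  [ ["nifty", "sensex", "bank nifty", "banknifty"],
    ["fii", "dii", "foreign institutional"],
    ["corporate action", "dividend", "split", "bonus", "rights", "buyback"],
    ["risk", "stop loss", "position size"] ]

def pvMessages : List String :=
  [ "Note: Nifty/Sensex/Bank Nifty index levels are not in your broker snapshot above — add an Anthropic API key for web-backed index and news.",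
    "Note: FII/DII flows are not in the Rupeezy snapshot; use Intel or enable AI + web search for flow headlines.",
    "Always verify ex-date and record date on the exchange circular before acting on corporate events.",
    "Risk reminder: size trades to max loss per idea; avoid single-name concentration." ]

-- the dict comprehension {kw: i for i, kws in enumerate(_RULE_KEYWORDS) for kw in kws}
def pvKeywordRule : List (String × Int) :=
  ((PySem.List.enumerate pvRuleKeywords).map (fun p => p.2.map (fun kw => (kw, p.1)))).flatten

def intent_hint_py_alt (user_text_lower : String) : Option String :=
  let skipCorporate := PySem.Str.isIn "verify" user_text_lower
  let hits : List Int := pvKeywordRule.filterMap (fun q =>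
      if PySem.Str.isIn q.1 user_text_lower && !(q.2 == 2 && skipCorporate) then some q.2 else none)
  match PySem.List.min? hits (fun x => x) with
  | none => none
  | some best => PySem.List.pyGet? pvMessages best

-- ===== PRECONDITION & SPEC =====
def Spec_intent_hint_py (user_text_lower : String) (out : Option String) : Prop := out = intent_hint_py_alt user_text_lower
instance (user_text_lower : String) (out : Option String) : Decidable (Spec_intent_hint_py user_text_lower out) := by unfold Spec_intent_hint_py; infer_instance

-- ===== CLAIM =====
def Claim_equal_intent_hint_py : Prop := ∀ (user_text_lower : String), Dom_intent_hint_py user_text_lower → Spec_intent_hint_py user_text_lower (intent_hint_py user_text_lower)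

-- ===== LEMMAS AND PROOFS =====
lemma pv_foldl_min_eq (l : List Int) (a : Int) (h : ∀ j ∈ l, a ≤ j) : l.foldl min a = a := by
  induction l generalizing a with
  | nil => rfl
  | cons x xs ih =>
      simp only [List.foldl_cons]
      rw [min_eq_left (h x (by simp))]
      exact ih a (fun j hj => h j (by simp [hj]))

lemma pv_min?_rep_append (n : Nat) (i : Int) (l : List Int) (h : ∀ j ∈ l, i ≤ j) :
    PySem.List.min? (List.replicate n i ++ l) (fun x => x)
      = if n = 0 then PySem.List.min? l (fun x => x) else some i := by
  cases n with
  | zero => simp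
  | succ m =>
      simp only [List.replicate_succ, List.cons_append, Nat.succ_ne_zero]
      rw [PySem.List.min?_id_cons]
      congr 1
      exact pv_foldl_min_eq _ i (by
        intro j hj
        rcases List.mem_append.1 hj with hj | hj
        · rw [List.eq_of_mem_replicate hj]
        · exact h j hj)

lemma pv_fm_const (p : String → Bool) (c : Bool) (i : Int) (kws : List String) :
    kws.filterMap (fun k => if p k && c then some i else none)
      = List.replicate (if c then (kws.filter p).length else 0) i := by
  induction kws with
  | nil => simp
  | cons x xs ih =>
      cases c with
      | false => simp
      | true =>
          simp only [Bool.and_true, if_true] at ih ⊢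
          rw [List.filterMap_cons, List.filter_cons]
          by_cases hx : p x = true <;> simp [hx, ih, List.replicate_succ]

lemma pv_any_iff_filter (p : String → Bool) (l : List String) :
    l.any p = true ↔ (l.filter p).length ≠ 0 := by
  simp [List.length_eq_zero_iff, List.filter_eq_nil_iff, List.any_eq_true]

lemma pv_rep_le (i x : Int) (n : Nat) (hx : i ≤ x) : ∀ j ∈ List.replicate n x, i ≤ j := by
  intro j hj
  rw [List.eq_of_mem_replicate hj]; exact hx

lemma pv_min4 (a b c d : Nat) :
    PySem.List.min? (List.replicate a (0:Int) ++ (List.replicate b 1 ++ (List.replicate c 2 ++ List.replicate d 3))) (fun x => x)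
      = if a ≠ 0 then some 0 else if b ≠ 0 then some 1 else if c ≠ 0 then some 2 else if d ≠ 0 then some 3 else none := by
  have h3 : PySem.List.min? (List.replicate d (3:Int)) (fun x => x) = if d ≠ 0 then some 3 else none := by
    have := pv_min?_rep_append d 3 [] (by simp)
    simp only [List.append_nil] at this
    rw [this]
    by_cases hd : d = 0 <;> simp [hd, PySem.List.min?]
  have h2 : PySem.List.min? (List.replicate c (2:Int) ++ List.replicate d 3) (fun x => x)
      = if c ≠ 0 then some 2 else if d ≠ 0 then some 3 else none := by
    rw [pv_min?_rep_append c 2 _ (pv_rep_le 2 3 d (by norm_num)), h3]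
    by_cases hc : c = 0 <;> simp [hc]
  have h1 : PySem.List.min? (List.replicate b (1:Int) ++ (List.replicate c 2 ++ List.replicate d 3)) (fun x => x)
      = if b ≠ 0 then some 1 else if c ≠ 0 then some 2 else if d ≠ 0 then some 3 else none := by
    rw [pv_min?_rep_append b 1 _ (by
        intro j hj
        rcases List.mem_append.1 hj with hj | hj
        · exact pv_rep_le 1 2 c (by norm_num) j hj
        · exact pv_rep_le 1 3 d (by norm_num) j hj), h2]
    by_cases hb : b = 0 <;> simp [hb]
  rw [pv_min?_rep_append a 0 _ (by
      intro j hj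
      rcases List.mem_append.1 hj with hj | hj
      · exact pv_rep_le 0 1 b (by norm_num) j hj
      · rcases List.mem_append.1 hj with hj | hj
        · exact pv_rep_le 0 2 c (by norm_num) j hj
        · exact pv_rep_le 0 3 d (by norm_num) j hj), h1]
  by_cases ha : a = 0 <;> simp [ha]

-- ===== VERDICT =====
theorem intent_hint_py_spec : Claim_equal_intent_hint_py := by
  intro t _
  unfold Spec_intent_hint_py intent_hint_py intent_hint_py_alt
  have hkw : pvKeywordRule =
      (["nifty", "sensex", "bank nifty", "banknifty"].map (fun k => (k, (0 : Int)))) ++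
      ((["fii", "dii", "foreign institutional"].map (fun k => (k, (1 : Int)))) ++
      ((["corporate action", "dividend", "split", "bonus", "rights", "buyback"].map (fun k => (k, (2 : Int)))) ++
      (["risk", "stop loss", "position size"].map (fun k => (k, (3 : Int)))))) := by
    rfl
  rw [hkw]
  simp only [List.filterMap_append, List.filterMap_map, Function.comp]
  have c0 : (fun k => if (PySem.Str.isIn k t && !((0 : Int) == 2 && PySem.Str.isIn "verify" t)) = true then some (0:Int) else none)
          = (fun k => if (PySem.Str.isIn k t && true) = true then some (0:Int) else none) := by funext k; simp
  have c1 : (fun k => if (PySem.Str.isIn k t && !((1 : Int) == 2 && PySem.Str.isIn "verify" t)) = true then some (1:Int) else none)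
          = (fun k => if (PySem.Str.isIn k t && true) = true then some (1:Int) else none) := by funext k; simp
  have c2 : (fun k => if (PySem.Str.isIn k t && !((2 : Int) == 2 && PySem.Str.isIn "verify" t)) = true then some (2:Int) else none)
          = (fun k => if (PySem.Str.isIn k t && !(PySem.Str.isIn "verify" t)) = true then some (2:Int) else none) := by funext k; simp
  have c3 : (fun k => if (PySem.Str.isIn k t && !((3 : Int) == 2 && PySem.Str.isIn "verify" t)) = true then some (3:Int) else none)
          = (fun k => if (PySem.Str.isIn k t && true) = true then some (3:Int) else none) := by funext k; simp
  rw [c0, c1, c2, c3,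
      pv_fm_const (fun k => PySem.Str.isIn k t) true 0 ["nifty", "sensex", "bank nifty", "banknifty"],
      pv_fm_const (fun k => PySem.Str.isIn k t) true 1 ["fii", "dii", "foreign institutional"],
      pv_fm_const (fun k => PySem.Str.isIn k t) (!(PySem.Str.isIn "verify" t)) 2 ["corporate action", "dividend", "split", "bonus", "rights", "buyback"],
      pv_fm_const (fun k => PySem.Str.isIn k t) true 3 ["risk", "stop loss", "position size"]]
  simp only [if_true]
  rw [pv_min4]
  have n0 : ((List.filter (fun k => PySem.Str.isIn k t) ["nifty", "sensex", "bank nifty", "banknifty"]).length ≠ 0)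
      ↔ (["nifty", "sensex", "bank nifty", "banknifty"].any (fun k => PySem.Str.isIn k t) = true) :=
    (pv_any_iff_filter _ _).symm
  have n1 : ((List.filter (fun k => PySem.Str.isIn k t) ["fii", "dii", "foreign institutional"]).length ≠ 0)
      ↔ (["fii", "dii", "foreign institutional"].any (fun k => PySem.Str.isIn k t) = true) :=
    (pv_any_iff_filter _ _).symm
  have n2 : ((List.filter (fun k => PySem.Str.isIn k t) ["corporate action", "dividend", "split", "bonus", "rights", "buyback"]).length ≠ 0)
      ↔ (["corporate action", "dividend", "split", "bonus", "rights", "buyback"].any (fun k => PySem.Str.isIn k t) = true) :=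
    (pv_any_iff_filter _ _).symm
  have n3 : ((List.filter (fun k => PySem.Str.isIn k t) ["risk", "stop loss", "position size"]).length ≠ 0)
      ↔ (["risk", "stop loss", "position size"].any (fun k => PySem.Str.isIn k t) = true) :=
    (pv_any_iff_filter _ _).symm
  cases hvv : PySem.Str.isIn "verify" t <;>
    simp only [Bool.not_false, Bool.not_true, Bool.and_eq_true, Bool.false_eq_true, and_false, and_true,
      if_true, if_false, n0, n1, n2, n3] <;>
  split_ifs <;>
    simp_all [pvMessages, PySem.List.pyGet?, PySem.List.pyIdx?]
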